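-- pv_equiv track=rewrite | github.com/MrJack100/UnderpaidOverworked | backend/groupFunctions.py | mergeGroupUnits
-- ===== SOURCE A (Python) =====
-- def mergeGroupUnits(group1Units, group2Units):
--     '''Sums up values of different group's units and removes duplicates.'''
--     newGroupUnits = []
--     for unit in group1Units:
--         newGroupUnits.append(unit)
--     for unit in group2Units:
--         # Checks all dictionaries in newGroupUnits for duplicates
--         for newUnit in newGroupUnits:
--             keyOfUnit = list(unit.keys())[0]
--             keyOfNewUnit = list(newUnit.keys())[0]
--             valueOfUnit = unit[keyOfUnit]
--             valueOfNewUnit = newUnit[keyOfNewUnit]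
--             if keyOfUnit == keyOfNewUnit:
--                 totalValue = valueOfUnit + valueOfNewUnit
--                 unit.update({keyOfUnit: totalValue})
--             else:
--                 pass
--         newGroupUnits.append(unit)
--     return(newGroupUnits)
-- ===== SOURCE B (Python) =====
-- def mergeGroupUnits(group1Units, group2Units):
--     '''Sums up values of different group's units and removes duplicates.
--     Single pass with a running-sum dict instead of A's quadratic inner scan.
--     Unlike A, does not mutate the group2 dicts in place (same return value).'''
--     sums = {}
--     out = []
--     for unit in group1Units:
--         key = next(iter(unit))
--         out.append(unit)
--         sums[key] = sums.get(key, 0) + unit[key]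
--     for unit in group2Units:
--         key = next(iter(unit))
--         total = unit[key] + sums.get(key, 0)
--         merged = dict(unit)
--         merged[key] = total
--         out.append(merged)
--         sums[key] = sums.get(key, 0) + total
--     return out
-- ===== Notes on version B (the rewrite author's own statement) =====
-- stated objective: faster
-- what changed: Replaces A's inner scan of the whole accumulated list for every group2 unit (mutating that unit repeatedly) by one running-sum dict keyed by unit key, so each appended value is computed in O(1) in a single pass.
-- outside the precondition, e.g. on mergeGroupUnits([{}], []): A returns [{}], B raises StopIteration
import Mathlib
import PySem

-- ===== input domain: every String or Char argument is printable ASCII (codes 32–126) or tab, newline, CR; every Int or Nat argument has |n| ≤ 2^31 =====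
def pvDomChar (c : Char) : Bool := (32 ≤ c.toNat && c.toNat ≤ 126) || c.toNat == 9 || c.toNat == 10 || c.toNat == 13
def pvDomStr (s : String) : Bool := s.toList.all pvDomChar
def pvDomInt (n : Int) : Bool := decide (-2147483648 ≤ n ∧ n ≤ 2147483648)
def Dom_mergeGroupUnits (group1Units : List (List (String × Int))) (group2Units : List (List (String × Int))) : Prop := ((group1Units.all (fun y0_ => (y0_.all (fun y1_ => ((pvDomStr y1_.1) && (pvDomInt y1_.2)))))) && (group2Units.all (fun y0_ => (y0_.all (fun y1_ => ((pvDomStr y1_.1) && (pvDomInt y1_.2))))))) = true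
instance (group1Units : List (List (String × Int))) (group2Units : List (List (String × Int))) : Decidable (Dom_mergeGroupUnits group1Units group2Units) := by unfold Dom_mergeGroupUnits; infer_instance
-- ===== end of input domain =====

-- B replaces A's quadratic rescans of the accumulated list by one running-sum dict (single pass);
-- equivalence is about the return value only: A mutates the group2 dicts in place, B does not.


-- ===== PORT A =====
-- list(unit.keys())[0] : none = IndexError on an empty dict (excluded by Pre_)
def pvFirstKey? (u : List (String × Int)) : Option String :=
  PySem.List.pyGet? (PySem.Dict.keys (PySem.Dict.mk u)) 0

-- one iteration of A's inner loop: unit possibly updated against newUnit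
def pvMergeInto (unit newUnit : List (String × Int)) : List (String × Int) :=
  match pvFirstKey? unit, pvFirstKey? newUnit with
  | some kU, some kN =>
    match (PySem.Dict.mk unit).get? kU, (PySem.Dict.mk newUnit).get? kN with
    | some vU, some vN =>
        if kU == kN then ((PySem.Dict.mk unit).insert kU (vU + vN)).items else unit
    | _, _ => unit   -- unreachable: the first key is always present in its dict
  | _, _ => unit     -- Python raises IndexError here; such inputs are outside Pre_

def mergeGroupUnits (group1Units : List (List (String × Int))) (group2Units : List (List (String × Int))) : List (List (String × Int)) :=
  let newGroupUnits := group1Units.foldl (fun acc unit => acc ++ [unit]) []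
  group2Units.foldl (fun acc unit => acc ++ [acc.foldl pvMergeInto unit]) newGroupUnits

-- ===== PORT B =====
-- first pass: append each group1 unit, add its (first-key) value to the running sums
def pvAltStep1 (st : List (List (String × Int)) × PySem.Dict String Int) (unit : List (String × Int)) : List (List (String × Int)) × PySem.Dict String Int :=
  match unit with
  | (k, v) :: _ => (st.1 ++ [unit], st.2.insert k (st.2.getD k 0 + v))
  | [] => (st.1 ++ [unit], st.2)   -- Python raises StopIteration here; outside Pre_

-- second pass: append the unit with its value bumped by the running sum, then update the sums
def pvAltStep2 (st : List (List (String × Int)) × PySem.Dict String Int) (unit : List (String × Int)) : List (List (String × Int)) × PySem.Dict String Int :=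
  match unit with
  | (k, v) :: rest =>
      let total := v + st.2.getD k 0
      (st.1 ++ [(k, total) :: rest], st.2.insert k (st.2.getD k 0 + total))
  | [] => (st.1 ++ [unit], st.2)   -- Python raises StopIteration here; outside Pre_

def mergeGroupUnits_alt (group1Units : List (List (String × Int))) (group2Units : List (List (String × Int))) : List (List (String × Int)) :=
  (group2Units.foldl pvAltStep2 (group1Units.foldl pvAltStep1 ([], PySem.Dict.empty))).1

-- ===== PRECONDITION & SPEC =====
-- Pre_ excludes units that are empty dicts (A raises IndexError on them whenever a later group2
-- unit scans them, and B itself raises StopIteration) and association lists with duplicate keys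
-- inside one unit, which do not represent any Python dict.
def Pre_mergeGroupUnits (group1Units : List (List (String × Int))) (group2Units : List (List (String × Int))) : Prop :=
  ∀ u ∈ group1Units ++ group2Units, u ≠ [] ∧ (u.map Prod.fst).Nodup

instance (group1Units : List (List (String × Int))) (group2Units : List (List (String × Int))) : Decidable (Pre_mergeGroupUnits group1Units group2Units) := by unfold Pre_mergeGroupUnits; infer_instance

def pvWitness_mergeGroupUnits : (List (List (String × Int))) × (List (List (String × Int))) :=
  ([[("a", 1)], [("b", 4)]], [[("a", 2), ("c", 7)], [("a", 3)]])

def Spec_mergeGroupUnits (group1Units : List (List (String × Int))) (group2Units : List (List (String × Int))) (out : List (List (String × Int))) : Prop := out = mergeGroupUnits_alt group1Units group2Units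
instance (group1Units : List (List (String × Int))) (group2Units : List (List (String × Int))) (out : List (List (String × Int))) : Decidable (Spec_mergeGroupUnits group1Units group2Units out) := by unfold Spec_mergeGroupUnits; infer_instance

-- ===== CLAIM (what is proved, stated in full; the proofs are below) =====
def Claim_equal_mergeGroupUnits : Prop := ∀ (group1Units : List (List (String × Int))) (group2Units : List (List (String × Int))), Dom_mergeGroupUnits group1Units group2Units → Pre_mergeGroupUnits group1Units group2Units → Spec_mergeGroupUnits group1Units group2Units (mergeGroupUnits group1Units group2Units)

-- ===== LEMMAS AND PROOFS =====

-- the contribution of one stored unit to the running sum at key k (first key, first value)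
def pvHead1 (k : String) (w : List (String × Int)) : Int :=
  match w with
  | (k', v') :: _ => if k' = k then v' else 0
  | [] => 0

-- total contribution of the accumulated list at key k
def pvS (acc : List (List (String × Int))) (k : String) : Int :=
  (acc.map (pvHead1 k)).sum

lemma pvS_append (acc : List (List (String × Int))) (w : List (String × Int)) (k : String) :
    pvS (acc ++ [w]) k = pvS acc k + pvHead1 k w := by
  simp [pvS]

lemma pvGet_cons_zero {A : Type} (a : A) (l : List A) :
    PySem.List.pyGet? (a :: l) 0 = some a := by
  simp [PySem.List.pyGet?, PySem.List.pyIdx?]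

lemma pvMergeInto_eq (k : String) (v : Int) (rest : List (String × Int))
    (hk : k ∉ rest.map Prod.fst) (w : List (String × Int)) (hw : w ≠ []) :
    pvMergeInto ((k, v) :: rest) w = (k, v + pvHead1 k w) :: rest := by
  obtain ⟨⟨k', v'⟩, tw, rfl⟩ : ∃ p tw, w = p :: tw := by
    cases w with
    | nil => exact absurd rfl hw
    | cons p tw => exact ⟨p, tw, rfl⟩
  unfold pvMergeInto pvFirstKey?
  simp only [PySem.Dict.keys_mk, List.map_cons, pvGet_cons_zero,
    PySem.Dict.get?_mk_cons, beq_self_eq_true, if_true]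
  by_cases hkk : k = k'
  · subst hkk
    simp only [beq_self_eq_true, if_true]
    rw [PySem.Dict.items_insert_of_contains _ _ (by simp [PySem.Dict.contains_mk])]
    have hrest : rest.map (fun p : String × Int => if (p.1 == k) = true then (k, v + v') else p) = rest := by
      refine (List.map_congr_left ?_).trans (List.map_id rest)
      intro p hp
      have hne : p.1 ≠ k := fun h => hk (h ▸ List.mem_map_of_mem hp)
      simp [hne]
    simp only [List.map_cons, beq_self_eq_true, if_true, hrest, pvHead1]
  · have hb : (k == k') = false := beq_eq_false_iff_ne.mpr hkk
    simp [hb, pvHead1, Ne.symm hkk]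

lemma pvInner_fold (acc : List (List (String × Int))) (hacc : ∀ w ∈ acc, w ≠ [])
    (k : String) (rest : List (String × Int)) (hk : k ∉ rest.map Prod.fst) :
    ∀ v : Int, acc.foldl pvMergeInto ((k, v) :: rest) = (k, v + pvS acc k) :: rest := by
  induction acc with
  | nil => intro v; simp [pvS]
  | cons w acc' ih =>
    intro v
    have hw : w ≠ [] := hacc w (by simp)
    have hacc' : ∀ w ∈ acc', w ≠ [] := fun u hu => hacc u (by simp [hu])
    rw [List.foldl_cons, pvMergeInto_eq k v rest hk w hw, ih hacc' (v + pvHead1 k w)]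
    simp [pvS, add_assoc]

lemma pvMain2 (g2 : List (List (String × Int))) :
    ∀ acc sums, (∀ u ∈ g2, u ≠ [] ∧ (u.map Prod.fst).Nodup) → (∀ w ∈ acc, w ≠ []) →
    (∀ k, sums.getD k 0 = pvS acc k) →
    g2.foldl (fun acc unit => acc ++ [acc.foldl pvMergeInto unit]) acc
      = (g2.foldl pvAltStep2 (acc, sums)).1 := by
  induction g2 with
  | nil => intro acc sums _ _ _; rfl
  | cons u g2' ih =>
    intro acc sums hg2 hacc hsums
    obtain ⟨hne, hnd⟩ := hg2 u (by simp)
    obtain ⟨⟨k, v⟩, rest, rfl⟩ : ∃ p rest, u = p :: rest := by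
      cases u with
      | nil => exact absurd rfl hne
      | cons p rest => exact ⟨p, rest, rfl⟩
    have hk : k ∉ rest.map Prod.fst := by
      rw [List.map_cons] at hnd
      exact (List.nodup_cons.mp hnd).1
    rw [List.foldl_cons, List.foldl_cons]
    rw [pvInner_fold acc hacc k rest hk v]
    have hstep : pvAltStep2 (acc, sums) ((k, v) :: rest)
        = (acc ++ [(k, v + pvS acc k) :: rest],
           sums.insert k (sums.getD k 0 + (v + sums.getD k 0))) := by
      simp [pvAltStep2, hsums k]
    rw [hstep]
    apply ih
    · exact fun u hu => hg2 u (by simp [hu])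
    · intro w hw
      rcases List.mem_append.mp hw with h | h
      · exact hacc w h
      · simp at h; subst h; simp
    · intro k'
      rw [PySem.Dict.getD_insert, pvS_append]
      by_cases hkk : k' = k
      · subst hkk
        simp [pvHead1, hsums k']
      · simp [hkk, hsums k', pvHead1, Ne.symm hkk]

lemma pvMain1 (g1 : List (List (String × Int))) :
    ∀ out sums, (∀ k, sums.getD k 0 = pvS out k) →
    (g1.foldl pvAltStep1 (out, sums)).1 = out ++ g1 ∧
    (∀ k, (g1.foldl pvAltStep1 (out, sums)).2.getD k 0 = pvS (out ++ g1) k) := by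
  induction g1 with
  | nil =>
    intro out sums hs
    exact ⟨by simp, fun k => by simpa using hs k⟩
  | cons u g1' ih =>
    intro out sums hs
    have hstep : ∃ sums', pvAltStep1 (out, sums) u = (out ++ [u], sums') ∧
        (∀ k, sums'.getD k 0 = pvS (out ++ [u]) k) := by
      cases u with
      | nil =>
        refine ⟨sums, rfl, fun k => ?_⟩
        rw [pvS_append]; simp [pvHead1, hs k]
      | cons p rest =>
        obtain ⟨k, v⟩ := p
        refine ⟨sums.insert k (sums.getD k 0 + v), rfl, fun k' => ?_⟩
        rw [PySem.Dict.getD_insert, pvS_append]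
        by_cases hkk : k' = k
        · subst hkk; simp [pvHead1, hs k']
        · simp [hkk, hs k', pvHead1, Ne.symm hkk]
    obtain ⟨sums', heq, hinv⟩ := hstep
    rw [List.foldl_cons, heq]
    have := ih (out ++ [u]) sums' hinv
    simpa [List.append_assoc] using this

-- ===== VERDICT (by name: the statement is the Claim_ definition above) =====
theorem mergeGroupUnits_spec : Claim_equal_mergeGroupUnits := by
  intro g1 g2 _ hpre
  unfold Spec_mergeGroupUnits mergeGroupUnits mergeGroupUnits_alt
  have h1 : ∀ u ∈ g1, u ≠ [] ∧ (u.map Prod.fst).Nodup :=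
    fun u hu => hpre u (List.mem_append.mpr (Or.inl hu))
  have h2 : ∀ u ∈ g2, u ≠ [] ∧ (u.map Prod.fst).Nodup :=
    fun u hu => hpre u (List.mem_append.mpr (Or.inr hu))
  have hA0 : g1.foldl (fun acc unit => acc ++ [unit]) ([] : List (List (String × Int))) = g1 := by
    simpa using PySem.List.foldl_append_singleton g1 ([] : List (List (String × Int)))
  obtain ⟨hfst, hsnd⟩ := pvMain1 g1 [] PySem.Dict.empty (by simp [pvS, PySem.Dict.getD_empty])
  simp only [List.nil_append] at hfst hsnd
  have hpair : g1.foldl pvAltStep1 ([], PySem.Dict.empty)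
      = (g1, (g1.foldl pvAltStep1 ([], PySem.Dict.empty)).2) := by
    rw [Prod.ext_iff]; exact ⟨hfst, rfl⟩
  rw [hA0, hpair]
  exact pvMain2 g2 g1 _ h2 (fun w hw => (h1 w hw).1) (fun k => hsnd k)
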